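-- pv_equiv track=rewrite | github.com/U-Kyung13/Data-structure-and-Algorithms-Study | Programmers/practice/0519_괄호회전하기.py | solution
-- ===== SOURCE A (Python) =====
-- def solution(s):
--
--     def solution1(s):
--         match = {')':'(', '}':'{', ']':'['}
--         stack = []
--         for c in s:
--             if c in '({[':
--                 stack.append(c)
--             elif c in match:
--                 if stack == []:
--                     return False
--                 else:
--                     t = stack.pop()
--                     if t != match[c]:
--                         return False
--         return stack == []
--
--
--     answer = 0
--     for i in range(len(s)):
--         s = s[1:]+s[0]
--         answer += solution1(s)
--
--     return answer
-- ===== SOURCE B (Python) =====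
-- def _step(t):
--     # remove the first adjacent matching bracket pair, or signal a fixpoint with None
--     for i in range(len(t) - 1):
--         if t[i] + t[i + 1] in ('()', '{}', '[]'):
--             return t[:i] + t[i + 2:]
--     return None
--
--
-- def solution(s):
--     answer = 0
--     for _ in range(len(s)):
--         s = s[1:] + s[0]
--         t = [c for c in s if c in '()[]{}']
--         while True:
--             u = _step(t)
--             if u is None:
--                 break
--             t = u
--         answer += (t == [])
--     return answer
-- ===== Notes on version B (the rewrite author's own statement) =====
-- stated objective: alternative
-- what changed: The inner stack-based bracket validator is replaced by a reduction-based one: filter to bracket characters, then repeatedly delete the first adjacent matching pair until a fixpoint; the rotation is valid iff the fixpoint is empty.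
import Mathlib
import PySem

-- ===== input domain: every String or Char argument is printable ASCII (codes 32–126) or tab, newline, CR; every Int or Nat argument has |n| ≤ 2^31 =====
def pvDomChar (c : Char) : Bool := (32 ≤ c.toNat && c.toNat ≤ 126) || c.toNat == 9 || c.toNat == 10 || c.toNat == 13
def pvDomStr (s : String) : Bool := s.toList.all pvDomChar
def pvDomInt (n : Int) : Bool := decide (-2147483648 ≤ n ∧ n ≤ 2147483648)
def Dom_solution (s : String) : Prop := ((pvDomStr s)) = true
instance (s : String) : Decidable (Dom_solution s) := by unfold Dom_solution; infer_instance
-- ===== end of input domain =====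

-- B replaces A's single-pass stack validator by an iterative adjacent-pair-elimination
-- validator (filter to brackets, delete matching adjacent pairs to a fixpoint); same results.

-- ===== PORT A =====
-- match[c] for the closers ')', '}', ']' (only ever applied to closers)
def pvMatch (c : Char) : Char := if c == ')' then '(' else if c == '}' then '{' else '['

-- the inner function solution1: fold over the characters carrying the stack
def pvVal1 : List Char → List Char → Bool
  | [], stack => stack == []
  | c :: cs, stack =>
    if c == '(' || c == '{' || c == '[' then pvVal1 cs (c :: stack)
    else if c == ')' || c == '}' || c == ']' then
      match stack with
      | [] => false
      | t :: rest => if t != pvMatch c then false else pvVal1 cs rest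
    else pvVal1 cs stack

-- the outer loop: n iterations of "s = s[1:] + s[0]; answer += solution1(s)".
-- s[1:] + s[0] is drop 1 ++ take 1 (the loop body only runs when s is nonempty,
-- so s[0] never raises).
def pvLoopA : Nat → List Char → Int → Int
  | 0, _, answer => answer
  | n + 1, l, answer =>
      let l' := l.drop 1 ++ l.take 1
      pvLoopA n l' (answer + (if pvVal1 l' [] then 1 else 0))

def solution (s : String) : Int := pvLoopA s.toList.length s.toList 0

-- ===== PORT B =====
def pvPairOK (c d : Char) : Bool :=
  (c == '(' && d == ')') || (c == '{' && d == '}') || (c == '[' && d == ']')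

-- _step: remove the first adjacent matching pair, or none at a fixpoint
def pvStep : List Char → Option (List Char)
  | c :: d :: rest =>
      if pvPairOK c d then some rest
      else (pvStep (d :: rest)).map (c :: ·)
  | _ => none

theorem pvStep_length : ∀ (t u : List Char), pvStep t = some u → u.length < t.length := by
  intro t
  induction t with
  | nil => intro u h; simp [pvStep] at h
  | cons c cs ih =>
    intro u h
    cases cs with
    | nil => simp [pvStep] at h
    | cons d rest =>
      by_cases hp : pvPairOK c d = true
      · simp [pvStep, hp] at h; subst h; simp only [List.length_cons]; omega
      · simp [pvStep, hp] at h
        obtain ⟨v, hv, rfl⟩ := h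
        have := ih v hv
        simp only [List.length_cons] at this ⊢
        omega

-- the while-True loop of B: iterate _step until it returns None
def pvReduce (t : List Char) : List Char :=
  match h : pvStep t with
  | some u => pvReduce u
  | none => t
termination_by t.length
decreasing_by exact pvStep_length _ _ h

def pvIsBracket (c : Char) : Bool :=
  c == '(' || c == ')' || c == '[' || c == ']' || c == '{' || c == '}'

def pvLoopB : Nat → List Char → Int → Int
  | 0, _, answer => answer
  | n + 1, l, answer =>
      let l' := l.drop 1 ++ l.take 1
      let t := l'.filter pvIsBracket
      pvLoopB n l' (answer + (if pvReduce t == [] then 1 else 0))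

def solution_alt (s : String) : Int := pvLoopB s.toList.length s.toList 0

-- ===== PRECONDITION & SPEC =====
def Spec_solution (s : String) (out : Int) : Prop := out = solution_alt s
instance (s : String) (out : Int) : Decidable (Spec_solution s out) := by unfold Spec_solution; infer_instance

-- ===== CLAIM (what is proved, stated in full; the proofs are below) =====
def Claim_equal_solution : Prop := ∀ (s : String), Dom_solution s → Spec_solution s (solution s)

-- ===== LEMMAS AND PROOFS =====

-- unfolding equations for pvReduce
theorem pvReduce_some (t u : List Char) (h : pvStep t = some u) : pvReduce t = pvReduce u := by
  rw [pvReduce]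
  split
  · next v hv => rw [h] at hv; cases hv; rfl
  · next hv => rw [h] at hv; cases hv

theorem pvReduce_none (t : List Char) (h : pvStep t = none) : pvReduce t = t := by
  rw [pvReduce]
  split
  · next v hv => rw [h] at hv; cases hv
  · rfl

-- removing an adjacent matching pair does not change the validator's verdict
theorem pvVal1_pair (o c : Char) (h : pvPairOK o c = true) :
    ∀ (xs ys st : List Char), pvVal1 (xs ++ o :: c :: ys) st = pvVal1 (xs ++ ys) st := by
  have hoc : (o = '(' ∧ c = ')') ∨ (o = '{' ∧ c = '}') ∨ (o = '[' ∧ c = ']') := by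
    simp [pvPairOK] at h; tauto
  have ho : (o == '(' || o == '{' || o == '[') = true := by
    rcases hoc with ⟨rfl, rfl⟩ | ⟨rfl, rfl⟩ | ⟨rfl, rfl⟩ <;> decide
  have hc : (c == '(' || c == '{' || c == '[') = false := by
    rcases hoc with ⟨rfl, rfl⟩ | ⟨rfl, rfl⟩ | ⟨rfl, rfl⟩ <;> decide
  have hc2 : (c == ')' || c == '}' || c == ']') = true := by
    rcases hoc with ⟨rfl, rfl⟩ | ⟨rfl, rfl⟩ | ⟨rfl, rfl⟩ <;> decide
  have hm : (o != pvMatch c) = false := by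
    rcases hoc with ⟨rfl, rfl⟩ | ⟨rfl, rfl⟩ | ⟨rfl, rfl⟩ <;> decide
  intro xs
  induction xs with
  | nil =>
    intro ys st
    simp only [List.nil_append, pvVal1, ho, if_pos]
    simp only [hc, hc2, Bool.false_eq_true, if_false, if_pos, hm]
  | cons x xs ih =>
    intro ys st
    simp only [List.cons_append, pvVal1]
    split
    · exact ih ys (x :: st)
    · split
      · cases st with
        | nil => rfl
        | cons t rest =>
          by_cases hx : (t != pvMatch x) = true
          · simp [hx]
          · simp only [Bool.not_eq_true] at hx; simp [hx, ih ys rest]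
      · exact ih ys st

-- a successful step is exactly the removal of one adjacent matching pair
theorem pvStep_some : ∀ (t u : List Char), pvStep t = some u →
    ∃ xs o c ys, t = xs ++ o :: c :: ys ∧ u = xs ++ ys ∧ pvPairOK o c = true := by
  intro t
  induction t with
  | nil => intro u h; simp [pvStep] at h
  | cons a cs ih =>
    intro u h
    cases cs with
    | nil => simp [pvStep] at h
    | cons d rest =>
      by_cases hp : pvPairOK a d = true
      · simp [pvStep, hp] at h
        exact ⟨[], a, d, rest, by simp, by simp [← h], hp⟩
      · simp [pvStep, hp] at h
        obtain ⟨v, hv, rfl⟩ := h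
        obtain ⟨xs, o, c, ys, h1, h2, h3⟩ := ih v hv
        exact ⟨a :: xs, o, c, ys, by simp [h1], by simp [h2], h3⟩

-- elements of a step's output come from the input
theorem pvStep_mem : ∀ (t u : List Char), pvStep t = some u → ∀ c ∈ u, c ∈ t := by
  intro t u h c hc
  obtain ⟨xs, o, c', ys, h1, h2, _⟩ := pvStep_some t u h
  subst h1; subst h2
  simp at hc ⊢
  tauto

-- decomposing "pvStep = none" at a cons
theorem pvStep_none_cons (a : Char) (cs : List Char) (h : pvStep (a :: cs) = none) :
    pvStep cs = none ∧ ∀ d rest, cs = d :: rest → pvPairOK a d = false := by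
  cases cs with
  | nil => exact ⟨rfl, by intro d rest h'; cases h'⟩
  | cons d rest =>
    by_cases hp : pvPairOK a d = true
    · simp [pvStep, hp] at h
    · simp [pvStep, hp] at h
      refine ⟨h, ?_⟩
      intro d' r' h'
      cases h'
      simpa using hp

-- the validator rejects every nonempty irreducible bracket-only string
theorem pvVal1_irreducible : ∀ (t st : List Char),
    (∀ c ∈ t, pvIsBracket c = true) → pvStep t = none →
    (∀ o c s' t', st = o :: s' → t = c :: t' → pvPairOK o c = false) →
    pvVal1 t st = true → t = [] ∧ st = [] := by
  intro t
  induction t with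
  | nil =>
    intro st _ _ _ hv
    simp [pvVal1] at hv
    exact ⟨rfl, hv⟩
  | cons c cs ih =>
    intro st hbr hstep hinv hv
    obtain ⟨hstep', hhead⟩ := pvStep_none_cons c cs hstep
    by_cases hop : (c == '(' || c == '{' || c == '[') = true
    · simp only [pvVal1, hop, if_pos] at hv
      have := ih (c :: st) (fun x hx => hbr x (by simp [hx])) hstep'
        (by intro o c' s' t' h1 h2; cases h1; exact hhead c' t' h2) hv
      exact absurd this.2 (by simp)
    · by_cases hcl : (c == ')' || c == '}' || c == ']') = true
      · simp only [pvVal1, hop, hcl, Bool.false_eq_true, if_false, if_pos] at hv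
        cases st with
        | nil => simp at hv
        | cons o rest =>
          by_cases hm : (o != pvMatch c) = true
          · simp [hm] at hv
          · -- o = pvMatch c, so (o, c) is a matching pair at the stack top:
            -- contradicts the invariant
            simp only [bne_iff_ne, ne_eq, Decidable.not_not] at hm
            have hcl' : c = ')' ∨ c = '}' ∨ c = ']' := by simp at hcl; tauto
            have hpair : pvPairOK o c = true := by
              subst hm
              rcases hcl' with rfl | rfl | rfl <;> decide
            have := hinv o c rest cs rfl rfl
            rw [hpair] at this; cases this
      · -- c is neither opener nor closer, but t is bracket-only: impossible
        have hb := hbr c (by simp)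
        have hb' : c = '(' ∨ c = ')' ∨ c = '[' ∨ c = ']' ∨ c = '{' ∨ c = '}' := by
          simp [pvIsBracket] at hb; tauto
        rcases hb' with rfl | rfl | rfl | rfl | rfl | rfl <;> simp at hop hcl

-- the reduction fixpoint really is a fixpoint
theorem pvReduce_fix : ∀ (t : List Char), pvStep (pvReduce t) = none := by
  intro t
  induction t using pvReduce.induct with
  | case1 t u h ih => rw [pvReduce_some t u h]; exact ih
  | case2 t h => rw [pvReduce_none t h]; exact h

-- reduction does not change the validator's verdict
theorem pvVal1_reduce : ∀ (t st : List Char), pvVal1 t st = pvVal1 (pvReduce t) st := by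
  intro t
  induction t using pvReduce.induct with
  | case1 t u h ih =>
    intro st
    rw [pvReduce_some t u h]
    obtain ⟨xs, o, c, ys, h1, h2, h3⟩ := pvStep_some t u h
    rw [h1, h2, pvVal1_pair o c h3]
    rw [← h2]
    exact ih st
  | case2 t h => intro st; rw [pvReduce_none t h]

-- reduction preserves membership
theorem pvReduce_mem : ∀ (t : List Char), ∀ c ∈ pvReduce t, c ∈ t := by
  intro t
  induction t using pvReduce.induct with
  | case1 t u h ih =>
    intro c hc
    rw [pvReduce_some t u h] at hc
    exact pvStep_mem t u h c (ih c hc)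
  | case2 t h => intro c hc; rwa [pvReduce_none t h] at hc

-- the validator ignores non-bracket characters
theorem pvVal1_filter : ∀ (l st : List Char), pvVal1 l st = pvVal1 (l.filter pvIsBracket) st := by
  intro l
  induction l with
  | nil => intro st; rfl
  | cons c cs ih =>
    intro st
    by_cases hb : pvIsBracket c = true
    · rw [List.filter_cons_of_pos hb]
      simp only [pvVal1]
      split
      · exact ih (c :: st)
      · split
        · cases st with
          | nil => rfl
          | cons t rest => by_cases hm : (t != pvMatch c) = true <;> simp [hm, ih rest]
        · exact ih st
    · rw [List.filter_cons_of_neg hb]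
      have hb' : ¬(c = '(' ∨ c = ')' ∨ c = '[' ∨ c = ']' ∨ c = '{' ∨ c = '}') := by
        simp [pvIsBracket] at hb; tauto
      have hop : (c == '(' || c == '{' || c == '[') = false := by
        simp; tauto
      have hcl : (c == ')' || c == '}' || c == ']') = false := by
        simp; tauto
      simp only [pvVal1, hop, hcl, Bool.false_eq_true, if_false]
      exact ih st

-- per-rotation: A's verdict equals B's verdict
theorem pvKey (l : List Char) : pvVal1 l [] = (pvReduce (l.filter pvIsBracket) == []) := by
  rw [pvVal1_filter, pvVal1_reduce]
  set r := pvReduce (l.filter pvIsBracket) with hr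
  cases hre : r with
  | nil => simp [pvVal1]
  | cons a rest =>
    have hbr : ∀ c ∈ r, pvIsBracket c = true := by
      intro c hc
      have := pvReduce_mem (l.filter pvIsBracket) c (hr ▸ hc)
      exact (List.mem_filter.mp this).2
    have hfix : pvStep r = none := hr ▸ pvReduce_fix _
    rw [← hre]
    cases hv : pvVal1 r [] with
    | false => simp [hre]
    | true =>
      have := pvVal1_irreducible r [] hbr hfix (by intro o c s' t' h1 _; cases h1) hv
      rw [hre] at this; cases this.1

-- the two outer loops coincide
theorem pvLoop_eq : ∀ (n : Nat) (l : List Char) (answer : Int),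
    pvLoopA n l answer = pvLoopB n l answer := by
  intro n
  induction n with
  | zero => intro l answer; rfl
  | succ n ih =>
    intro l answer
    simp only [pvLoopA, pvLoopB, pvKey]
    exact ih _ _

-- ===== VERDICT (by name: the statement is the Claim_ definition above) =====
theorem solution_spec : Claim_equal_solution := by
  intro s _
  unfold Spec_solution solution solution_alt
  exact pvLoop_eq _ _ _
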